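-- pv_equiv track=rewrite | github.com/Arthur-Dauphole/Projet-BRAIN | Arthur_2/BRAIN_PROJECT/modules/detector.py | _reflect_normalized_pixels
-- ===== SOURCE A (Python) =====
-- def _reflect_normalized_pixels(pixels: frozenset, axis: str) -> frozenset:
--     """
--     Reflect normalized pixels along the given axis and re-normalize.
--     """
--     if not pixels:
--         return frozenset()
--
--     pixels_list = list(pixels)
--     h = max(p[0] for p in pixels_list) + 1
--     w = max(p[1] for p in pixels_list) + 1
--
--     reflected = []
--     for r, c in pixels_list:
--         if axis == "horizontal":
--             new_r, new_c = h - 1 - r, c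
--         elif axis == "vertical":
--             new_r, new_c = r, w - 1 - c
--         else:
--             new_r, new_c = r, c
--         reflected.append((new_r, new_c))
--
--     # Re-normalize
--     min_r = min(p[0] for p in reflected)
--     min_c = min(p[1] for p in reflected)
--
--     return frozenset((p[0] - min_r, p[1] - min_c) for p in reflected)
-- ===== SOURCE B (Python) =====
-- def _reflect_normalized_pixels(pixels: frozenset, axis: str) -> frozenset:
--     """
--     Reflect normalized pixels along the given axis and re-normalize,
--     via a closed-form coordinate map: reflecting r -> h-1-r and then
--     shifting by the new minimum is the same as r -> max_r - r, so one
--     extrema computation and a single comprehension suffice.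
--     """
--     if not pixels:
--         return frozenset()
--
--     rows = [p[0] for p in pixels]
--     cols = [p[1] for p in pixels]
--     min_r, max_r = min(rows), max(rows)
--     min_c, max_c = min(cols), max(cols)
--
--     if axis == "horizontal":
--         return frozenset((max_r - r, c - min_c) for r, c in pixels)
--     elif axis == "vertical":
--         return frozenset((r - min_r, max_c - c) for r, c in pixels)
--     else:
--         return frozenset((r - min_r, c - min_c) for r, c in pixels)
-- ===== Notes on version B (the rewrite author's own statement) =====
-- stated objective: simpler
-- what changed: Replaces A's reflect-then-renormalize two-stage pipeline (build h/w, materialize a reflected list, re-scan it for its minima, shift) by the equivalent closed-form map ((h-1-r)-(h-1-max_r)=max_r-r): one extrema pass over the input and a single comprehension, no intermediate reflected list.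
import Mathlib
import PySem

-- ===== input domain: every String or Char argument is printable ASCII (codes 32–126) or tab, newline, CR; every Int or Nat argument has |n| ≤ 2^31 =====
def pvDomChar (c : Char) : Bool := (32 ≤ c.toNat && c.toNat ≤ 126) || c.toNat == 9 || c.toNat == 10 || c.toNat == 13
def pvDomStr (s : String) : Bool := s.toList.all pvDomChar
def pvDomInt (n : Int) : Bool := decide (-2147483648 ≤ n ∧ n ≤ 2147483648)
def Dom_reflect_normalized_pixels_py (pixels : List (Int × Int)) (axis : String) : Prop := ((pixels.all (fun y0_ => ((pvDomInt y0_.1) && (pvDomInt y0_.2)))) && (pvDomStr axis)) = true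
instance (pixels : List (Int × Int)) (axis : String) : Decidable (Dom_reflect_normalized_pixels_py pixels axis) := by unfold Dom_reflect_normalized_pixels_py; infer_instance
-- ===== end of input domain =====

-- B replaces A's reflect-then-renormalize pipeline (build h/w, materialize a reflected
-- list, re-scan it for minima, shift) by the equivalent closed-form coordinate map
-- (max_r - r / max_c - c): one extrema pass, no intermediate list. (objective: simpler)

-- ===== PORT A =====
def reflect_normalized_pixels_py (pixels : List (Int × Int)) (axis : String) : List (Int × Int) :=
  if pixels = [] then []
  else
    let h := (PySem.List.max? (pixels.map (fun p => p.1)) (fun x => x)).getD 0 + 1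
    let w := (PySem.List.max? (pixels.map (fun p => p.2)) (fun x => x)).getD 0 + 1
    let reflected := pixels.foldl (fun acc p =>
      acc ++ [if axis = "horizontal" then (h - 1 - p.1, p.2)
              else if axis = "vertical" then (p.1, w - 1 - p.2)
              else (p.1, p.2)]) []
    let min_r := (PySem.List.min? (reflected.map (fun p => p.1)) (fun x => x)).getD 0
    let min_c := (PySem.List.min? (reflected.map (fun p => p.2)) (fun x => x)).getD 0
    PySem.Set.ofList (reflected.map (fun p => (p.1 - min_r, p.2 - min_c)))

-- ===== PORT B =====
def reflect_normalized_pixels_py_alt (pixels : List (Int × Int)) (axis : String) : List (Int × Int) :=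
  if pixels = [] then []
  else
    let rows := pixels.map (fun p => p.1)
    let cols := pixels.map (fun p => p.2)
    let min_r := (PySem.List.min? rows (fun x => x)).getD 0
    let max_r := (PySem.List.max? rows (fun x => x)).getD 0
    let min_c := (PySem.List.min? cols (fun x => x)).getD 0
    let max_c := (PySem.List.max? cols (fun x => x)).getD 0
    if axis = "horizontal" then
      PySem.Set.ofList (pixels.map (fun p => (max_r - p.1, p.2 - min_c)))
    else if axis = "vertical" then
      PySem.Set.ofList (pixels.map (fun p => (p.1 - min_r, max_c - p.2)))
    else
      PySem.Set.ofList (pixels.map (fun p => (p.1 - min_r, p.2 - min_c)))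

-- ===== PRECONDITION & SPEC =====
def Spec_reflect_normalized_pixels_py (pixels : List (Int × Int)) (axis : String) (out : List (Int × Int)) : Prop := out = reflect_normalized_pixels_py_alt pixels axis
instance (pixels : List (Int × Int)) (axis : String) (out : List (Int × Int)) : Decidable (Spec_reflect_normalized_pixels_py pixels axis out) := by unfold Spec_reflect_normalized_pixels_py; infer_instance

-- ===== CLAIM (what is proved, stated in full; the proofs are below) =====
def Claim_equal_reflect_normalized_pixels_py : Prop := ∀ (pixels : List (Int × Int)) (axis : String), Dom_reflect_normalized_pixels_py pixels axis → Spec_reflect_normalized_pixels_py pixels axis (reflect_normalized_pixels_py pixels axis)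

-- ===== LEMMAS AND PROOFS =====

-- A's append-accumulator loop builds the mapped list.
theorem pv_foldl_append_map {α β : Type} (g : α → β) (l : List α) (acc : List β) :
    l.foldl (fun a p => a ++ [g p]) acc = acc ++ l.map g := by
  induction l generalizing acc with
  | nil => simp
  | cons x t ih => simp [List.foldl, ih]

-- running min of (k - yᵢ) is k minus the running max of yᵢ
theorem pv_foldl_min_sub (k x : Int) (t : List Int) :
    (t.map (fun y => k - y)).foldl min (k - x) = k - t.foldl max x := by
  induction t generalizing x with
  | nil => rfl
  | cons a t ih =>
      simp only [List.map, List.foldl]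
      rw [show min (k - x) (k - a) = k - max x a by omega, ih]

-- min of the reflected first coordinates = k minus max of the originals
theorem pv_min_fst_reflected (k : Int) (q : Int × Int) (t : List (Int × Int)) :
    (PySem.List.min? (List.map (fun p : Int × Int => k - p.1) (q :: t)) (fun x => x)).getD 0
      = k - (PySem.List.max? (List.map (fun p : Int × Int => p.1) (q :: t)) (fun x => x)).getD 0 := by
  simpa [PySem.List.min?_id_cons, PySem.List.max?_id_cons, List.map_map, Function.comp_def]
    using pv_foldl_min_sub k q.1 (t.map (fun p => p.1))

theorem pv_min_snd_reflected (k : Int) (q : Int × Int) (t : List (Int × Int)) :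
    (PySem.List.min? (List.map (fun p : Int × Int => k - p.2) (q :: t)) (fun x => x)).getD 0
      = k - (PySem.List.max? (List.map (fun p : Int × Int => p.2) (q :: t)) (fun x => x)).getD 0 := by
  simpa [PySem.List.min?_id_cons, PySem.List.max?_id_cons, List.map_map, Function.comp_def]
    using pv_foldl_min_sub k q.2 (t.map (fun p => p.2))

theorem pv_reflect_eq (pixels : List (Int × Int)) (axis : String) :
    reflect_normalized_pixels_py pixels axis = reflect_normalized_pixels_py_alt pixels axis := by
  cases pixels with
  | nil => rfl
  | cons q t =>
      unfold reflect_normalized_pixels_py reflect_normalized_pixels_py_alt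
      simp only [if_neg (List.cons_ne_nil q t), pv_foldl_append_map, List.nil_append]
      by_cases hh : axis = "horizontal"
      · subst hh
        simp only [String.reduceEq, reduceIte, List.map_map, Function.comp_def]
        rw [pv_min_fst_reflected]
        generalize (PySem.List.max? (List.map (fun p : Int × Int => p.1) (q :: t)) (fun x => x)).getD 0 = M
        generalize (PySem.List.min? (List.map (fun p : Int × Int => p.2) (q :: t)) (fun x => x)).getD 0 = C
        congr 1
        refine List.map_congr_left fun p _ => ?_
        refine Prod.ext ?_ ?_ <;> simp
      · by_cases hv : axis = "vertical"
        · subst hv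
          simp only [String.reduceEq, reduceIte, List.map_map, Function.comp_def]
          rw [pv_min_snd_reflected]
          generalize (PySem.List.max? (List.map (fun p : Int × Int => p.2) (q :: t)) (fun x => x)).getD 0 = M
          generalize (PySem.List.min? (List.map (fun p : Int × Int => p.1) (q :: t)) (fun x => x)).getD 0 = C
          congr 1
          refine List.map_congr_left fun p _ => ?_
          refine Prod.ext ?_ ?_ <;> simp
        · simp only [if_neg hh, if_neg hv, List.map_map, Function.comp_def, Prod.mk.eta]

-- ===== VERDICT (by name: the statement is the Claim_ definition above) =====
theorem reflect_normalized_pixels_py_spec : Claim_equal_reflect_normalized_pixels_py := by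
  intro pixels axis _
  exact pv_reflect_eq pixels axis
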